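-- pv_equiv track=rewrite | github.com/saidniyr1943/CTI-110 | master_final_review_completed_with_test2_labs_and_practice.py | fruitName
-- ===== SOURCE A (Python) =====
-- def fruitName(fruits):
--     """Return the counts of apple-like and banana-like fruit names in a tuple."""
--     countApple = 0
--     countBanana = 0
--     for name in fruits:
--         if name[0] == "a" or name[0] == "A":
--             countApple += 1
--         elif name[0] == "b" or name[0] == "B":
--             countBanana += 1
--     return countApple, countBanana
-- ===== SOURCE B (Python) =====
-- def fruitName(fruits):
--     """Return the counts of apple-like and banana-like fruit names in a tuple."""
--     firsts = [name[0] for name in fruits]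
--     return (firsts.count("a") + firsts.count("A"),
--             firsts.count("b") + firsts.count("B"))
-- ===== Notes on version B (the rewrite author's own statement) =====
-- stated objective: idiomatic
-- what changed: B first projects the list to its first characters, then answers with four list.count scans over that projection, replacing A's single accumulator loop with per-element if/elif branching.
import Mathlib
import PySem

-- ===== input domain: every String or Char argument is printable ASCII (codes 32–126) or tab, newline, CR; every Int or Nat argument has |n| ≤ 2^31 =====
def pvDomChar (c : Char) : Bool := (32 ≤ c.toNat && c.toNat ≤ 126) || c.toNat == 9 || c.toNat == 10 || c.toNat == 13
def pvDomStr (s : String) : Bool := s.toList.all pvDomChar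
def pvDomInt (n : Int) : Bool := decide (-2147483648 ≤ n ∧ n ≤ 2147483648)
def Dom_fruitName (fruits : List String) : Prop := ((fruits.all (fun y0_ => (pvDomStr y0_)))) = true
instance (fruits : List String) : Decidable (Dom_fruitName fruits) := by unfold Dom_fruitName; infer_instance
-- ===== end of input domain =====

-- B replaces A's branching accumulator loop by a projection to first characters followed by four list.count scans (idiomatic; same cost).

-- ===== PORT A =====
def fruitName (fruits : List String) : Int × Int :=
  fruits.foldl (fun (st : Int × Int) name =>
    if PySem.Str.pyGet? name 0 = some 'a' ∨ PySem.Str.pyGet? name 0 = some 'A' then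
      (st.1 + 1, st.2)
    else if PySem.Str.pyGet? name 0 = some 'b' ∨ PySem.Str.pyGet? name 0 = some 'B' then
      (st.1, st.2 + 1)
    else st) (0, 0)

-- ===== PORT B =====
def fruitName_alt (fruits : List String) : Int × Int :=
  let firsts := fruits.map (fun name => PySem.Str.pyGet? name 0)
  ((PySem.List.count firsts (some 'a') : Int) + (PySem.List.count firsts (some 'A') : Int),
   (PySem.List.count firsts (some 'b') : Int) + (PySem.List.count firsts (some 'B') : Int))

-- ===== PRECONDITION & SPEC =====
-- Pre_ excludes lists containing an empty string: there name[0] raises IndexError in both A and B.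
def Pre_fruitName (fruits : List String) : Prop := ∀ s ∈ fruits, s ≠ ""
instance (fruits : List String) : Decidable (Pre_fruitName fruits) := by unfold Pre_fruitName; infer_instance
def pvWitness_fruitName : List String := ["apple", "Berry", "cherry", "avocado"]

def Spec_fruitName (fruits : List String) (out : Int × Int) : Prop := out = fruitName_alt fruits
instance (fruits : List String) (out : Int × Int) : Decidable (Spec_fruitName fruits out) := by unfold Spec_fruitName; infer_instance

-- ===== CLAIM (what is proved, stated in full; the proofs are below) =====
def Claim_equal_fruitName : Prop := ∀ (fruits : List String), Dom_fruitName fruits → Pre_fruitName fruits → Spec_fruitName fruits (fruitName fruits)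

-- ===== LEMMAS AND PROOFS =====

-- A's loop adds the countP of each predicate to the starting counters.
theorem fruitName_loopA (l : List (Option Char)) (ca cb : Int) :
    l.foldl (fun (st : Int × Int) k =>
      if k = some 'a' ∨ k = some 'A' then (st.1 + 1, st.2)
      else if k = some 'b' ∨ k = some 'B' then (st.1, st.2 + 1)
      else st) (ca, cb)
    = (ca + l.countP (fun k => k = some 'a' ∨ k = some 'A'),
       cb + l.countP (fun k => k = some 'b' ∨ k = some 'B')) := by
  induction l generalizing ca cb with
  | nil => simp
  | cons x xs ih =>
    simp only [List.foldl_cons, List.countP_cons]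
    by_cases ha : x = some 'a' ∨ x = some 'A'
    · have hb : ¬ (x = some 'b' ∨ x = some 'B') := by rcases ha with h | h <;> subst h <;> simp
      simp only [if_pos ha, ih]
      simp [ha, hb]; omega
    · by_cases hb : x = some 'b' ∨ x = some 'B'
      · simp only [if_neg ha, if_pos hb, ih]
        simp [ha, hb]; omega
      · simp only [if_neg ha, if_neg hb, ih]
        simp [ha, hb]

-- a disjunctive countP splits into the two counts (the two values are distinct).
theorem countP_or_eq_count_add {c d : Option Char} (hcd : c ≠ d) (l : List (Option Char)) :
    l.countP (fun k => k = c ∨ k = d) = l.count c + l.count d := by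
  induction l with
  | nil => rfl
  | cons x xs ih =>
    rw [List.countP_cons, ih, List.count_cons, List.count_cons]
    by_cases hc : x = c
    · subst hc
      have hd : ¬ (x = d) := hcd
      simp [hd]; omega
    · by_cases hd : x = d
      · subst hd
        simp [hc]; omega
      · simp [hc, hd]

theorem fruitName_eq (fruits : List String) : fruitName fruits = fruitName_alt fruits := by
  unfold fruitName fruitName_alt
  have hA := fruitName_loopA (fruits.map (fun n => PySem.Str.pyGet? n 0)) 0 0
  rw [List.foldl_map] at hA
  rw [hA]
  simp only [PySem.List.count_eq]
  rw [countP_or_eq_count_add (show (some 'a' : Option Char) ≠ some 'A' by decide),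
      countP_or_eq_count_add (show (some 'b' : Option Char) ≠ some 'B' by decide)]
  push_cast
  ring_nf

-- ===== VERDICT (by name: the statement is the Claim_ definition above) =====
theorem fruitName_spec : Claim_equal_fruitName := by
  intro fruits _ _
  unfold Spec_fruitName
  exact fruitName_eq fruits
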